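-- pv_equiv track=rewrite | github.com/kl4kennylee81/poke-env | examples/pokebot/test_player.py | get_realistic_ev_spread
-- ===== SOURCE A (Python) =====
-- def get_realistic_ev_spread(base_stats):
--     """
--     Generate a realistic EV spread based on base stat distribution.
--     Total EVs = 510, max per stat = 252.
--     """
--     # Create list of (stat_name, base_value) sorted by base value
--     stats_by_value = sorted(base_stats.items(), key=lambda x: x[1], reverse=True)
--
--     ev_spread = {stat: 0 for stat in base_stats.keys()}
--     remaining_evs = 510
--
--     # Strategy: Invest heavily in top 2 stats, moderately in 3rd, minimally in rest
--     priorities = [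
--         (252, 1),  # Max invest in highest stat
--         (252, 1),  # Max invest in second highest stat
--         (6, 1),    # Minimal invest in remaining stats for rounding
--     ]
--
--     stat_index = 0
--     for ev_amount, num_stats in priorities:
--         for _ in range(min(num_stats, len(stats_by_value) - stat_index)):
--             if remaining_evs >= ev_amount and stat_index < len(stats_by_value):
--                 stat_name = stats_by_value[stat_index][0]
--                 actual_investment = min(ev_amount, remaining_evs)
--                 ev_spread[stat_name] = actual_investment
--                 remaining_evs -= actual_investment
--                 stat_index += 1
--
--     # Distribute any remaining EVs to unfilled stats
--     while remaining_evs > 0 and stat_index < len(stats_by_value):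
--         stat_name = stats_by_value[stat_index][0]
--         investment = min(6, remaining_evs)  # Small investments
--         ev_spread[stat_name] = investment
--         remaining_evs -= investment
--         stat_index += 1
--
--     return ev_spread
-- ===== SOURCE B (Python) =====
-- def get_realistic_ev_spread(base_stats):
--     """
--     Generate a realistic EV spread based on base stat distribution.
--     Total EVs = 510, max per stat = 252.
--     """
--     ranked = sorted(base_stats.items(), key=lambda kv: kv[1], reverse=True)
--     ev_spread = {stat: 0 for stat in base_stats}
--     # The greedy budget always yields 252, 252 and 6 for the top three stats.
--     for (stat, _), amount in zip(ranked, (252, 252, 6)):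
--         ev_spread[stat] = amount
--     return ev_spread
-- ===== Notes on version B (the rewrite author's own statement) =====
-- stated objective: simpler
-- what changed: Replaced the stateful greedy (priorities list, remaining-EV accumulator, index counter and a trailing while-loop fallback) by a direct rank-based assignment: zip the descending-sorted stats with the three fixed amounts in one pass with no mutable budget.
import Mathlib
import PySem

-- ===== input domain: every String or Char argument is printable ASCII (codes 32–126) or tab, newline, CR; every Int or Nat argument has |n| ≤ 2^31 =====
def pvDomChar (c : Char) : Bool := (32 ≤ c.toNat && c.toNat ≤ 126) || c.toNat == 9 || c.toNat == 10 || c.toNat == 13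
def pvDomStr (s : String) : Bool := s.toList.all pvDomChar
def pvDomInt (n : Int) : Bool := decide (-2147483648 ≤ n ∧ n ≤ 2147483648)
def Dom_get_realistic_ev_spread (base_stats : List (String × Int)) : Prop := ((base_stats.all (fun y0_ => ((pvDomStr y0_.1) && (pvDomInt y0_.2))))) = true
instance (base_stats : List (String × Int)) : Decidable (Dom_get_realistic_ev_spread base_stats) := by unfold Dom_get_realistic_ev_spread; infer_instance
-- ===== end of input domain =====

-- B replaces A's stateful greedy (priorities list, remaining-EV budget, index counter, while fallback)
-- by a single zip of the descending-sorted stats with the three fixed amounts: simpler, same cost.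

-- ===== PORT A =====
-- the trailing 'while remaining_evs > 0 and stat_index < len(...)' loop, step for step
def evSpreadWhile (sbv : List (String × Int)) (ev : PySem.Dict String Int)
    (remaining : Int) (idx : Nat) : PySem.Dict String Int :=
  if remaining > 0 ∧ idx < sbv.length then
    match sbv[idx]? with
    | some p =>
        evSpreadWhile sbv (ev.insert p.1 (min 6 remaining)) (remaining - min 6 remaining) (idx + 1)
    | none => ev      -- unreachable: idx < sbv.length is guarded above
  else ev
termination_by sbv.length - idx
decreasing_by omega

def get_realistic_ev_spread (base_stats : List (String × Int)) : List (String × Int) :=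
  let stats_by_value := PySem.List.sorted base_stats (fun x => x.2) true
  let ev_spread : PySem.Dict String Int :=
    base_stats.foldl (fun d p => d.insert p.1 0) PySem.Dict.empty
  let priorities : List (Int × Nat) := [(252, 1), (252, 1), (6, 1)]
  let st :=
    priorities.foldl (fun (st : PySem.Dict String Int × Int × Nat) pr =>
      (List.range (min pr.2 (stats_by_value.length - st.2.2))).foldl (fun st _ =>
        if st.2.1 ≥ pr.1 ∧ st.2.2 < stats_by_value.length then
          match stats_by_value[st.2.2]? with
          | some p =>
              let actual_investment := min pr.1 st.2.1
              (st.1.insert p.1 actual_investment, st.2.1 - actual_investment, st.2.2 + 1)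
          | none => st     -- unreachable: st.2.2 < length is guarded above
        else st) st) (ev_spread, (510 : Int), (0 : Nat))
  (evSpreadWhile stats_by_value st.1 st.2.1 st.2.2).items

-- ===== PORT B =====
def get_realistic_ev_spread_alt (base_stats : List (String × Int)) : List (String × Int) :=
  let ranked := PySem.List.sorted base_stats (fun kv => kv.2) true
  let ev_spread : PySem.Dict String Int :=
    base_stats.foldl (fun d p => d.insert p.1 0) PySem.Dict.empty
  ((ranked.zip [(252 : Int), 252, 6]).foldl (fun d pr => d.insert pr.1.1 pr.2) ev_spread).items

-- ===== PRECONDITION & SPEC =====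
def Spec_get_realistic_ev_spread (base_stats : List (String × Int)) (out : List (String × Int)) : Prop := out = get_realistic_ev_spread_alt base_stats
instance (base_stats : List (String × Int)) (out : List (String × Int)) : Decidable (Spec_get_realistic_ev_spread base_stats out) := by unfold Spec_get_realistic_ev_spread; infer_instance

-- ===== CLAIM (what is proved, stated in full; the proofs are below) =====
def Claim_equal_get_realistic_ev_spread : Prop := ∀ (base_stats : List (String × Int)), Dom_get_realistic_ev_spread base_stats → Spec_get_realistic_ev_spread base_stats (get_realistic_ev_spread base_stats)

-- ===== LEMMAS AND PROOFS =====

-- ===== VERDICT (by name: the statement is the Claim_ definition above) =====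
theorem get_realistic_ev_spread_spec : Claim_equal_get_realistic_ev_spread := by
  intro base_stats _
  unfold Spec_get_realistic_ev_spread get_realistic_ev_spread get_realistic_ev_spread_alt
  match hL : PySem.List.sorted base_stats (fun x => x.2) true with
  | [] => simp [evSpreadWhile]
  | [a] => simp [evSpreadWhile]
  | [a, b] => simp [evSpreadWhile, List.range_succ]
  | a :: b :: c :: t => simp [evSpreadWhile, List.range_succ]
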